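-- pv_equiv track=rewrite | github.com/coderameen/DSA-Workshops | list/21_zero_one_elements.py | arrangezeorOne
-- ===== SOURCE A (Python) =====
-- def arrangezeorOne(arr):
--     zeroArr = []
--     oneArr = []
--     for i in range(0,len(arr)):
--         if arr[i]==0:
--             zeroArr.append(arr[i])
--         else:
--             oneArr.append(arr[i])
--
--     return zeroArr + oneArr
-- ===== SOURCE B (Python) =====
-- def arrangezeorOne(arr):
--     # stable sort on the boolean key "is non-zero": zeros (False) first, then
--     # non-zeros (True), each group keeping its original order
--     return sorted(arr, key=lambda x: x != 0)
-- ===== Notes on version B (the rewrite author's own statement) =====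
-- stated objective: idiomatic
-- what changed: Replaces the explicit two-bucket accumulation loop with a single stable sort keyed on the boolean 'x != 0', which puts all zeros before all non-zeros while preserving each group's order.
import Mathlib
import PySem

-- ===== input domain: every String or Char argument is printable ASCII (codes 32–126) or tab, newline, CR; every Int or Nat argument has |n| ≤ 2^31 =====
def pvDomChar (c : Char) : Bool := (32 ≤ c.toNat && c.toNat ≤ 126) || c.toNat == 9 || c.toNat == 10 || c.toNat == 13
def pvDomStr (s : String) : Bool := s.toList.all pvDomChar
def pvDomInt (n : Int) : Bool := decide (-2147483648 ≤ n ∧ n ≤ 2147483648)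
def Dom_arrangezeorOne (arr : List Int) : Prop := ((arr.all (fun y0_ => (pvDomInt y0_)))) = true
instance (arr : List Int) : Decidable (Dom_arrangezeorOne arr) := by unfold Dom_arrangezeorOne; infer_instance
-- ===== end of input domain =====

-- B replaces A's two-bucket partition loop with one stable sort on the boolean key "x != 0" (idiomatic; same return value).


-- ===== PORT A =====
-- for i in range(0, len(arr)): append arr[i] to zeroArr / oneArr; return zeroArr + oneArr.
-- arr[i] is ported with pyGetD (index i is always in range here, so the default is never used).
def arrangezeorOne (arr : List Int) : List Int :=
  let st :=
    (PySem.List.pyRange 0 (arr.length : Int) 1).foldl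
      (fun (st : List Int × List Int) i =>
        let v := PySem.List.pyGetD arr i 0
        if v = 0 then (st.1 ++ [v], st.2) else (st.1, st.2 ++ [v]))
      ([], [])
  st.1 ++ st.2

-- ===== PORT B =====
-- sorted(arr, key=lambda x: x != 0); Python's False/True keys are ported as 0/1.
def arrangezeorOne_alt (arr : List Int) : List Int :=
  PySem.List.sorted arr (fun x => if x ≠ 0 then (1 : Int) else 0) false

-- ===== PRECONDITION & SPEC =====
def Spec_arrangezeorOne (arr : List Int) (out : List Int) : Prop := out = arrangezeorOne_alt arr
instance (arr : List Int) (out : List Int) : Decidable (Spec_arrangezeorOne arr out) := by unfold Spec_arrangezeorOne; infer_instance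

-- ===== CLAIM (what is proved, stated in full; the proofs are below) =====
def Claim_equal_arrangezeorOne : Prop := ∀ (arr : List Int), Dom_arrangezeorOne arr → Spec_arrangezeorOne arr (arrangezeorOne arr)

-- ===== LEMMAS AND PROOFS =====

-- the boolean key of B, named for the proofs
def pvKey (x : Int) : Int := if x ≠ 0 then 1 else 0

-- A's loop over indices is the fold of the same body over the list itself
lemma loopA_eq_foldl (arr : List Int) :
    (PySem.List.pyRange 0 (arr.length : Int) 1).foldl
      (fun (st : List Int × List Int) i =>
        let v := PySem.List.pyGetD arr i 0
        if v = 0 then (st.1 ++ [v], st.2) else (st.1, st.2 ++ [v]))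
      ([], [])
    = arr.foldl
        (fun (st : List Int × List Int) v =>
          if v = 0 then (st.1 ++ [v], st.2) else (st.1, st.2 ++ [v]))
        ([], []) := by
  simpa using
    PySem.List.foldl_pyRange_pyGetD' (a := 0) (xs := arr) (d := 0)
      (f := fun (st : List Int × List Int) v =>
        if v = 0 then (st.1 ++ [v], st.2) else (st.1, st.2 ++ [v]))
      (init := (([] : List Int), ([] : List Int))) (by norm_num)

-- A's fold computes the two filters
lemma loopA_filters (arr : List Int) : ∀ z o : List Int,
    arr.foldl
      (fun (st : List Int × List Int) v =>
        if v = 0 then (st.1 ++ [v], st.2) else (st.1, st.2 ++ [v]))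
      (z, o)
    = (z ++ arr.filter (fun x => decide (x = 0)),
       o ++ arr.filter (fun x => !decide (x = 0))) := by
  induction arr with
  | nil => intro z o; simp
  | cons x rest ih =>
    intro z o
    by_cases hx : x = 0 <;> simp [hx, ih]

-- inserting a zero into (zeros ++ nonzeros) puts it right after the zeros
lemma insert_zero (x : Int) (hx : x = 0) : ∀ z o : List Int,
    (∀ y ∈ z, y = 0) → (∀ y ∈ o, y ≠ 0) →
    PySem.List.insertBy (fun a b => decide (pvKey a < pvKey b)) x (z ++ o) = z ++ x :: o := by
  intro z
  induction z with
  | nil =>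
    intro o _ ho
    cases o with
    | nil => simp [PySem.List.insertBy]
    | cons y ys =>
      have hy : y ≠ 0 := ho y (by simp)
      simp [PySem.List.insertBy, pvKey, hx, hy]
  | cons w z' ih =>
    intro o hz ho
    have hw : w = 0 := hz w (by simp)
    have h' : ∀ y ∈ z', y = 0 := fun y hy => hz y (by simp [hy])
    have hb : (decide (pvKey x < pvKey w)) = false := by simp [pvKey, hx, hw]
    rw [List.cons_append]
    rw [show PySem.List.insertBy (fun a b => decide (pvKey a < pvKey b)) x (w :: (z' ++ o))
          = w :: PySem.List.insertBy (fun a b => decide (pvKey a < pvKey b)) x (z' ++ o) by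
        simp [PySem.List.insertBy, hb]]
    rw [ih o h' ho]
    simp

-- inserting a non-zero appends it at the end
lemma insert_nonzero (x : Int) (hx : x ≠ 0) (l : List Int) :
    PySem.List.insertBy (fun a b => decide (pvKey a < pvKey b)) x l = l ++ [x] := by
  apply PySem.List.insertBy_of_forall_not_before
  intro y _
  by_cases hy : y = 0 <;> simp [pvKey, hx, hy]

-- the insertion-sort fold keeps the (zeros ++ nonzeros) shape and ends at the two filters
lemma sorted_loop (arr : List Int) : ∀ z o : List Int,
    (∀ y ∈ z, y = 0) → (∀ y ∈ o, y ≠ 0) →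
    arr.foldl
      (fun acc x => PySem.List.insertBy (fun a b => decide (pvKey a < pvKey b)) x acc)
      (z ++ o)
    = (z ++ arr.filter (fun x => decide (x = 0))) ++
      (o ++ arr.filter (fun x => !decide (x = 0))) := by
  induction arr with
  | nil => intro z o _ _; simp
  | cons x rest ih =>
    intro z o hz ho
    by_cases hx : x = 0
    · have hstep := insert_zero x hx z o hz ho
      have hz' : ∀ y ∈ z ++ [x], y = 0 := by
        intro y hy
        rcases List.mem_append.1 hy with h | h
        · exact hz y h
        · simpa using hx ▸ (List.mem_singleton.1 h)
      have := ih (z ++ [x]) o hz' ho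
      simp only [List.foldl_cons, hstep]
      have hxo : z ++ x :: o = (z ++ [x]) ++ o := by simp
      rw [hxo, this]
      simp [hx]
    · have hstep := insert_nonzero x hx (z ++ o)
      have ho' : ∀ y ∈ o ++ [x], y ≠ 0 := by
        intro y hy
        rcases List.mem_append.1 hy with h | h
        · exact ho y h
        · simpa using (List.mem_singleton.1 h) ▸ hx
      have := ih z (o ++ [x]) hz ho'
      simp only [List.foldl_cons, hstep]
      have hxo : (z ++ o) ++ [x] = z ++ (o ++ [x]) := by simp
      rw [hxo, this]
      simp [hx]

lemma alt_eq_filters (arr : List Int) :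
    arrangezeorOne_alt arr
      = arr.filter (fun x => decide (x = 0)) ++ arr.filter (fun x => !decide (x = 0)) := by
  unfold arrangezeorOne_alt
  rw [PySem.List.sorted_eq_foldl_insertBy]
  simpa [pvKey] using sorted_loop arr [] [] (by simp) (by simp)

-- ===== VERDICT (by name: the statement is the Claim_ definition above) =====
theorem arrangezeorOne_spec : Claim_equal_arrangezeorOne := by
  intro arr _
  unfold Spec_arrangezeorOne arrangezeorOne
  rw [alt_eq_filters]
  simp only [loopA_eq_foldl, loopA_filters]
  simp
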